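-- pv_equiv track=rewrite | github.com/sukhbinder/kon | scripts/show_themes.py | replace_or_append_theme_line
-- ===== SOURCE A (Python) =====
-- def replace_or_append_theme_line(config_text: str, theme_name: str) -> str:
--     lines = config_text.splitlines()
--     in_ui_section = False
--     ui_section_found = False
--
--     for index, line in enumerate(lines):
--         stripped = line.strip()
--         if stripped.startswith("[") and stripped.endswith("]"):
--             if stripped == "[ui]":
--                 in_ui_section = True
--                 ui_section_found = True
--                 continue
--             if in_ui_section:
--                 lines.insert(index, f'theme = "{theme_name}"')
--                 return "\n".join(lines) + "\n"
--             in_ui_section = False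
--             continue
--
--         if in_ui_section and stripped.startswith("theme") and "=" in stripped:
--             lines[index] = f'theme = "{theme_name}"'
--             return "\n".join(lines) + "\n"
--
--     if ui_section_found:
--         lines.append(f'theme = "{theme_name}"')
--         return "\n".join(lines) + "\n"
--
--     suffix = "\n" if config_text.endswith("\n") or not config_text else "\n\n"
--     return f'{config_text}{suffix}[ui]\ntheme = "{theme_name}"\n'
-- ===== SOURCE B (Python) =====
-- def replace_or_append_theme_line(config_text: str, theme_name: str) -> str:
--     new_line = f'theme = "{theme_name}"'
--     lines = config_text.splitlines()
--
--     # Phase 1: locate the first "[ui]" header.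
--     start = next((i for i, l in enumerate(lines) if l.strip() == "[ui]"), None)
--     if start is None:
--         suffix = "\n" if config_text.endswith("\n") or not config_text else "\n\n"
--         return f'{config_text}{suffix}[ui]\ntheme = "{theme_name}"\n'
--
--     # Phase 2: find where the ui section ends (the next header that is not a
--     # repeated "[ui]"), or the end of the file.
--     end = len(lines)
--     for i in range(start + 1, len(lines)):
--         s = lines[i].strip()
--         if s.startswith("[") and s.endswith("]") and s != "[ui]":
--             end = i
--             break
--
--     # Phase 3: replace the first theme line inside the section, else insert
--     # the new line at the section's end.
--     for i in range(start + 1, end):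
--         s = lines[i].strip()
--         if s.startswith("theme") and "=" in s:
--             return "\n".join(lines[:i] + [new_line] + lines[i + 1:]) + "\n"
--     return "\n".join(lines[:end] + [new_line] + lines[end:]) + "\n"
-- ===== Notes on version B (the rewrite author's own statement) =====
-- stated objective: alternative
-- what changed: A's single fused stateful scan (in_ui/ui_found flags with early returns and in-loop mutation) is replaced by three separate phases: locate the [ui] header, locate the section's end (next non-[ui] header), then replace the first theme line in that slice or insert at the section end; reassembly uses slicing instead of in-place set/insert.
import Mathlib
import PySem

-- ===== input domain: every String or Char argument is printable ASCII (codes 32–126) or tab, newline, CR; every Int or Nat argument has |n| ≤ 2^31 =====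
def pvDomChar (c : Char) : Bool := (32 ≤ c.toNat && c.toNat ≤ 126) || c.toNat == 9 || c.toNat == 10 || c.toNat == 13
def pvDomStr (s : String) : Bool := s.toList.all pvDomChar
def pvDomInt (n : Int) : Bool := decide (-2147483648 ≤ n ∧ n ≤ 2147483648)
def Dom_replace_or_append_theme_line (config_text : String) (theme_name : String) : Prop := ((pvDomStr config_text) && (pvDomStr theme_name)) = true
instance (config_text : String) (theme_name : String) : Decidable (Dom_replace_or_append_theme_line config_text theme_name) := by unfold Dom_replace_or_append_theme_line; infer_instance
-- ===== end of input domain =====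

-- B restructures A's single fused stateful scan into three separate phases (find [ui], find section end, replace-or-insert in that slice); same values, same cost ("alternative").

-- ===== PORT A =====
-- A's for-loop with early returns: `some r` = an early `return r` (or the
-- post-loop ui_found append, fired when the loop runs out); `none` = the loop
-- fell through with ui_found = False.  `lines.insert(index, x)` (here always
-- with 0 ≤ index < len) is List.insertIdx; `lines[index] = x` is List.set.
def pvA_loop (tl : String) (lines : List String) : List String → Nat → Bool → Bool → Option String
  | [], _, _, ui_found =>
    if ui_found then some (PySem.Str.join "\n" (lines ++ [tl]) ++ "\n") else none
  | line :: rest, index, in_ui, ui_found =>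
    let stripped := PySem.Str.strip line
    if PySem.Str.startswith stripped "[" && PySem.Str.endswith stripped "]" then
      if stripped == "[ui]" then pvA_loop tl lines rest (index + 1) true true
      else if in_ui then some (PySem.Str.join "\n" (lines.insertIdx index tl) ++ "\n")
      else pvA_loop tl lines rest (index + 1) false ui_found
    else if in_ui && PySem.Str.startswith stripped "theme" && PySem.Str.isIn "=" stripped then
      some (PySem.Str.join "\n" (lines.set index tl) ++ "\n")
    else pvA_loop tl lines rest (index + 1) in_ui ui_found

def replace_or_append_theme_line (config_text : String) (theme_name : String) : String :=
  let lines := PySem.Str.splitlines config_text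
  match pvA_loop ("theme = \"" ++ theme_name ++ "\"") lines lines 0 false false with
  | some r => r
  | none =>
    let suffix := if PySem.Str.endswith config_text "\n" || config_text == "" then "\n" else "\n\n"
    config_text ++ suffix ++ "[ui]\ntheme = \"" ++ theme_name ++ "\"\n"

-- ===== PORT B =====
-- Phase 1 of Source B: index of the first line stripping to "[ui]".
def pvB_findStart : List String → Nat → Option Nat
  | [], _ => none
  | l :: rest, i =>
    if PySem.Str.strip l == "[ui]" then some i else pvB_findStart rest (i + 1)

-- Phase 2 of Source B: the for-loop over range(start+1, len(lines)) with break.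
def pvB_findEnd : List String → Nat → Nat
  | [], i => i
  | l :: rest, i =>
    let s := PySem.Str.strip l
    if PySem.Str.startswith s "[" && PySem.Str.endswith s "]" && !(s == "[ui]") then i
    else pvB_findEnd rest (i + 1)

-- Phase 3 of Source B: the for-loop over range(start+1, end).
def pvB_findTheme : List String → Nat → Nat → Option Nat
  | [], _, _ => none
  | l :: rest, i, e =>
    if e ≤ i then none
    else
      let s := PySem.Str.strip l
      if PySem.Str.startswith s "theme" && PySem.Str.isIn "=" s then some i
      else pvB_findTheme rest (i + 1) e

-- slices lines[:i] / lines[i:] have non-negative in-range bounds: exactly take/drop.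
def replace_or_append_theme_line_alt (config_text : String) (theme_name : String) : String :=
  let new_line := "theme = \"" ++ theme_name ++ "\""
  let lines := PySem.Str.splitlines config_text
  match pvB_findStart lines 0 with
  | none =>
    let suffix := if PySem.Str.endswith config_text "\n" || config_text == "" then "\n" else "\n\n"
    config_text ++ suffix ++ "[ui]\ntheme = \"" ++ theme_name ++ "\"\n"
  | some start =>
    let e := pvB_findEnd (lines.drop (start + 1)) (start + 1)
    match pvB_findTheme (lines.drop (start + 1)) (start + 1) e with
    | some i => PySem.Str.join "\n" (lines.take i ++ [new_line] ++ lines.drop (i + 1)) ++ "\n"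
    | none => PySem.Str.join "\n" (lines.take e ++ [new_line] ++ lines.drop e) ++ "\n"

-- ===== PRECONDITION & SPEC =====
def Spec_replace_or_append_theme_line (config_text : String) (theme_name : String) (out : String) : Prop := out = replace_or_append_theme_line_alt config_text theme_name
instance (config_text : String) (theme_name : String) (out : String) : Decidable (Spec_replace_or_append_theme_line config_text theme_name out) := by unfold Spec_replace_or_append_theme_line; infer_instance

-- ===== CLAIM (what is proved, stated in full; the proofs are below) =====
def Claim_equal_replace_or_append_theme_line : Prop := ∀ (config_text : String) (theme_name : String), Dom_replace_or_append_theme_line config_text theme_name → Spec_replace_or_append_theme_line config_text theme_name (replace_or_append_theme_line config_text theme_name)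

-- ===== LEMMAS AND PROOFS =====

theorem pvB_findEnd_ge (rest : List String) : ∀ i, i ≤ pvB_findEnd rest i := by
  induction rest with
  | nil => intro i; simp [pvB_findEnd]
  | cons l rest ih =>
    intro i
    simp only [pvB_findEnd]
    split
    · exact le_refl i
    · exact le_trans (Nat.le_succ i) (ih (i + 1))

theorem pv_insertIdx_eq {α : Type} (a : α) : ∀ (l : List α) (i : Nat), i ≤ l.length →
    l.insertIdx i a = l.take i ++ a :: l.drop i := by
  intro l
  induction l with
  | nil =>
    intro i h
    have h0 : i = 0 := Nat.le_zero.mp h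
    subst h0
    simp
  | cons x l ih =>
    intro i h
    cases i with
    | zero => simp
    | succ i =>
      simp only [List.insertIdx_succ_cons, List.take_succ_cons, List.drop_succ_cons,
        List.cons_append, List.cons.injEq, true_and]
      exact ih i (by simpa using h)

-- the in-ui phase of A's fused loop = B's phases 2 and 3 on the same suffix
theorem pvA_phase2 (tl : String) (lines : List String) :
    ∀ (rest : List String) (i : Nat), rest = lines.drop i →
      pvA_loop tl lines rest i true true =
        some (match pvB_findTheme rest i (pvB_findEnd rest i) with
          | some j => PySem.Str.join "\n" (lines.take j ++ [tl] ++ lines.drop (j + 1)) ++ "\n"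
          | none => PySem.Str.join "\n"
              (lines.take (pvB_findEnd rest i) ++ [tl] ++ lines.drop (pvB_findEnd rest i)) ++ "\n") := by
  intro rest
  induction rest with
  | nil =>
    intro i h
    have hlen : lines.length ≤ i := by
      by_contra hc
      have := List.drop_eq_nil_iff.mp h.symm
      omega
    simp [pvA_loop, pvB_findEnd, pvB_findTheme, List.take_of_length_le hlen,
      List.drop_of_length_le hlen]
  | cons line rest ih =>
    intro i h
    have hi : i < lines.length := by
      by_contra hc
      have hnil : lines.drop i = [] := List.drop_eq_nil_iff.mpr (by omega)
      rw [hnil] at h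
      exact List.cons_ne_nil _ _ h
    have hrest : rest = lines.drop (i + 1) := by
      have := congrArg List.tail h
      simpa [List.tail_drop] using this
    have hgt : ¬ pvB_findEnd rest (i + 1) ≤ i := by
      have := pvB_findEnd_ge rest (i + 1); omega
    by_cases hhd : (PySem.Str.startswith (PySem.Str.strip line) "[" &&
        PySem.Str.endswith (PySem.Str.strip line) "]") = true
    · by_cases hui : (PySem.Str.strip line == "[ui]") = true
      · -- a repeated "[ui]" header: both sides skip the line
        have hs : PySem.Str.strip line = "[ui]" := eq_of_beq hui
        have hE : pvB_findEnd (line :: rest) i = pvB_findEnd rest (i + 1) := by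
          simp only [pvB_findEnd, hs]
          rw [if_neg (by decide)]
        have hT : pvB_findTheme (line :: rest) i (pvB_findEnd rest (i + 1)) =
            pvB_findTheme rest (i + 1) (pvB_findEnd rest (i + 1)) := by
          simp only [pvB_findTheme, hs]
          rw [if_neg hgt, if_neg (by decide)]
        simp only [pvA_loop]
        rw [if_pos hhd, if_pos hui, ih (i + 1) hrest, hE, hT]
      · -- the next section's header: A inserts at index i, B inserts at end = i
        have hui' : (PySem.Str.strip line == "[ui]") = false := by
          cases hb : (PySem.Str.strip line == "[ui]") <;> simp_all
        have hE : pvB_findEnd (line :: rest) i = i := by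
          simp only [pvB_findEnd, hhd, hui', Bool.not_false, Bool.and_true]
          rw [if_pos trivial]
        have hT : pvB_findTheme (line :: rest) i i = none := by
          simp only [pvB_findTheme]
          rw [if_pos (le_refl i)]
        simp only [pvA_loop]
        rw [if_pos hhd, if_neg hui, if_pos trivial, hE, hT]
        simp [pv_insertIdx_eq tl lines i (le_of_lt hi)]
    · -- not a header line
      have hhd' : (PySem.Str.startswith (PySem.Str.strip line) "[" &&
          PySem.Str.endswith (PySem.Str.strip line) "]") = false := by
        cases hb : (PySem.Str.startswith (PySem.Str.strip line) "[" &&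
          PySem.Str.endswith (PySem.Str.strip line) "]") <;> simp_all
      have hE : pvB_findEnd (line :: rest) i = pvB_findEnd rest (i + 1) := by
        simp only [pvB_findEnd, hhd', Bool.false_and]
        rw [if_neg (by simp)]
      by_cases hth : (PySem.Str.startswith (PySem.Str.strip line) "theme" &&
          PySem.Str.isIn "=" (PySem.Str.strip line)) = true
      · -- an existing theme line: A sets index i, B replaces at i
        have hT : pvB_findTheme (line :: rest) i (pvB_findEnd rest (i + 1)) = some i := by
          simp only [pvB_findTheme]
          rw [if_neg hgt, if_pos hth]
        simp only [pvA_loop, Bool.true_and]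
        rw [if_neg hhd, if_pos hth, hE, hT]
        rw [List.set_eq_take_append_cons_drop, if_pos hi]
        simp
      · have hT : pvB_findTheme (line :: rest) i (pvB_findEnd rest (i + 1)) =
            pvB_findTheme rest (i + 1) (pvB_findEnd rest (i + 1)) := by
          simp only [pvB_findTheme]
          rw [if_neg hgt, if_neg hth]
        simp only [pvA_loop, Bool.true_and]
        rw [if_neg hhd, if_neg hth, ih (i + 1) hrest, hE, hT]

-- the searching phase of A's fused loop = B's phase 1
theorem pvA_phase1 (tl : String) (lines : List String) :
    ∀ (rest : List String) (i : Nat), rest = lines.drop i →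
      pvA_loop tl lines rest i false false =
        (match pvB_findStart rest i with
          | none => none
          | some s => pvA_loop tl lines (lines.drop (s + 1)) (s + 1) true true) := by
  intro rest
  induction rest with
  | nil => intro i _; simp [pvA_loop, pvB_findStart]
  | cons line rest ih =>
    intro i h
    have hrest : rest = lines.drop (i + 1) := by
      have := congrArg List.tail h
      simpa [List.tail_drop] using this
    by_cases hui : (PySem.Str.strip line == "[ui]") = true
    · have hs : PySem.Str.strip line = "[ui]" := eq_of_beq hui
      have hhd : (PySem.Str.startswith (PySem.Str.strip line) "[" &&
          PySem.Str.endswith (PySem.Str.strip line) "]") = true := by rw [hs]; decide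
      simp only [pvA_loop, pvB_findStart]
      rw [if_pos hhd, if_pos hui, if_pos hui, hrest]
    · simp only [pvA_loop, Bool.false_and, Bool.false_eq_true, if_false]
      have hB : pvB_findStart (line :: rest) i = pvB_findStart rest (i + 1) := by
        simp only [pvB_findStart]; rw [if_neg hui]
      rw [hB, ← ih (i + 1) hrest, if_neg hui, ite_self]

-- ===== VERDICT (by name: the statement is the Claim_ definition above) =====
theorem replace_or_append_theme_line_spec : Claim_equal_replace_or_append_theme_line := by
  intro config_text theme_name _
  unfold Spec_replace_or_append_theme_line
  unfold replace_or_append_theme_line replace_or_append_theme_line_alt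
  simp only
  rw [pvA_phase1 _ _ (PySem.Str.splitlines config_text) 0 (by simp)]
  cases hs : pvB_findStart (PySem.Str.splitlines config_text) 0 with
  | none => simp
  | some start =>
    simp only
    rw [pvA_phase2 _ _ (List.drop (start + 1) (PySem.Str.splitlines config_text)) (start + 1) rfl]
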